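-- pv_equiv track=rewrite | github.com/jterweeme/jterweeme.github.io | euler.py | problem40
-- ===== SOURCE A (Python) =====
-- def decimals(n):
--     i = 0
--     while n: n = n // 10; i += 1
--     return i
--
-- def digit(n, i):
--     return n // 10**i % 10
--
-- def product(l):
--     xsum = 1
--     for n in l: xsum *= n
--     return xsum
--
-- def problem40(indices = [0,9,99,999,9999,99999,999999]):
--     def champernowne(i):
--         offset, decimals, setLow, setLength, limit = 0, 1, 1, 9, 9
--         while i >= limit:
--             offset = limit
--             decimals += 1
--             setLow *= 10
--             setLength *= 10
--             limit += setLength * decimals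
--         n, ind = divmod(i - offset, decimals)
--         return digit(n + setLow, decimals - (ind + 1))
--     return product(champernowne(i) for i in indices)
-- ===== SOURCE B (Python) =====
-- def problem40(indices=[0, 9, 99, 999, 9999, 99999, 999999]):
--     if not indices:
--         return 1
--     # bounds[k] = index of the first digit contributed by the (k+1)-digit numbers
--     m = max(indices)
--     bounds = [0]
--     d = 1
--     while bounds[-1] <= m:
--         bounds.append(bounds[-1] + 9 * 10 ** (d - 1) * d)
--         d += 1
--     prod = 1
--     for i in indices:
--         # binary search: largest d in [1, len(bounds)-1] with bounds[d-1] <= i (d = 1 if none)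
--         lo, hi = 1, len(bounds) - 1
--         while lo < hi:
--             mid = (lo + hi + 1) // 2
--             if bounds[mid - 1] <= i:
--                 lo = mid
--             else:
--                 hi = mid - 1
--         d = lo
--         q, r = divmod(i - bounds[d - 1], d)
--         prod *= (10 ** (d - 1) + q) // 10 ** (d - 1 - r) % 10
--     return prod
-- ===== Notes on version B (the rewrite author's own statement) =====
-- stated objective: alternative
-- what changed: Replaces A's per-index incremental five-variable block walk by a block-boundary table built once up to max(indices) followed by a per-index binary search over that table; the digit is then extracted from the located block by one divmod.
import Mathlib
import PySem

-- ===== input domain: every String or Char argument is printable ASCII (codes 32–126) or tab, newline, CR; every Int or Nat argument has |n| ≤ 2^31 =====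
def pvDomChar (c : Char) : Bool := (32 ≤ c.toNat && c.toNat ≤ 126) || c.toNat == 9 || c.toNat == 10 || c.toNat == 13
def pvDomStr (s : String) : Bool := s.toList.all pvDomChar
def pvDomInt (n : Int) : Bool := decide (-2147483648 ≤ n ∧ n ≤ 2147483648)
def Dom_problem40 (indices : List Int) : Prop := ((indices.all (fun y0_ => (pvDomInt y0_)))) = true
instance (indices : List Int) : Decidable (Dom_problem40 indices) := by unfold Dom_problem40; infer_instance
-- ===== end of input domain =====

-- B replaces A's per-index incremental five-variable block walk by a block-boundary
-- table built once up to max(indices) plus a per-index binary search over that table;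
-- same return value on every input (no precondition needed).

-- ===== PORT A =====
-- digit(n, i) = n // 10**i % 10; every call in this program has i ≥ 0, where 10 ^ i.toNat is exact
def pyDigit (n i : Int) : Int := PySem.Int.mod (PySem.Int.floordiv n (10 ^ i.toNat)) 10

-- the 'while i >= limit' loop of champernowne, carrying its five state variables;
-- fuel only makes the recursion total (the loop runs at most 11 times for |i| ≤ 2^31)
def champLoopA (fuel : Nat) (i offset decimals setLow setLength limit : Int) :
    Int × Int × Int × Int × Int :=
  match fuel with
  | 0 => (offset, decimals, setLow, setLength, limit)
  | fuel + 1 =>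
    if i ≥ limit then
      champLoopA fuel i limit (decimals + 1) (setLow * 10) (setLength * 10)
        (limit + setLength * 10 * (decimals + 1))
    else (offset, decimals, setLow, setLength, limit)

def champernowneA (i : Int) : Int :=
  let s := champLoopA 32 i 0 1 1 9 9
  let offset := s.1
  let decimals := s.2.1
  let setLow := s.2.2.1
  -- n, ind = divmod(i - offset, decimals); decimals ≥ 1 at every call, so floordiv/mod are exact
  let n := PySem.Int.floordiv (i - offset) decimals
  let ind := PySem.Int.mod (i - offset) decimals
  pyDigit (n + setLow) (decimals - (ind + 1))

def productA (l : List Int) : Int := l.foldl (fun xsum n => xsum * n) 1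

def problem40 (indices : List Int) : Int := productA (indices.map champernowneA)

-- ===== PORT B =====
-- the 'while bounds[-1] <= m: bounds.append(...)' loop; fuel only makes the recursion total
def buildBoundsB (fuel : Nat) (m : Int) (bounds : List Int) (d : Int) : List Int :=
  match fuel with
  | 0 => bounds
  | fuel + 1 =>
    let last := (PySem.List.pyGet? bounds (-1)).getD 0
    if last ≤ m then
      buildBoundsB fuel m (bounds ++ [last + 9 * 10 ^ (d - 1).toNat * d]) (d + 1)
    else bounds

-- the 'while lo < hi' binary-search loop; fuel only makes the recursion total
def bsearchB (fuel : Nat) (bounds : List Int) (i lo hi : Int) : Int :=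
  match fuel with
  | 0 => lo
  | fuel + 1 =>
    if lo < hi then
      let mid := PySem.Int.floordiv (lo + hi + 1) 2
      if (PySem.List.pyGet? bounds (mid - 1)).getD 0 ≤ i then
        bsearchB fuel bounds i mid hi
      else
        bsearchB fuel bounds i lo (mid - 1)
    else lo

def problem40_alt (indices : List Int) : Int :=
  if indices = [] then 1
  else
    let m := (PySem.List.max? indices (fun x => x)).getD 0
    let bounds := buildBoundsB 64 m [0] 1
    indices.foldl
      (fun prod i =>
        let d := bsearchB 64 bounds i 1 ((bounds.length : Int) - 1)
        let b := (PySem.List.pyGet? bounds (d - 1)).getD 0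
        let q := PySem.Int.floordiv (i - b) d
        let r := PySem.Int.mod (i - b) d
        prod *
          PySem.Int.mod
            (PySem.Int.floordiv (10 ^ (d - 1).toNat + q) (10 ^ (d - 1 - r).toNat)) 10)
      1

-- ===== PRECONDITION & SPEC =====
def Spec_problem40 (indices : List Int) (out : Int) : Prop := out = problem40_alt indices
instance (indices : List Int) (out : Int) : Decidable (Spec_problem40 indices out) := by unfold Spec_problem40; infer_instance

-- ===== CLAIM (what is proved, stated in full; the proofs are below) =====
def Claim_equal_problem40 : Prop := ∀ (indices : List Int), Dom_problem40 indices → Spec_problem40 indices (problem40 indices)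

-- ===== LEMMAS AND PROOFS =====

-- Cf d = number of digits contributed by all numbers of at most d digits
def Cf : Nat → Int
  | 0 => 0
  | d + 1 => Cf d + 9 * 10 ^ d * (d + 1)

lemma Cf_lt_succ (d : Nat) : Cf d < Cf (d + 1) := by
  have : (0 : Int) < 9 * 10 ^ d * (d + 1) := by positivity
  simp only [Cf]; omega

lemma Cf_mono {d e : Nat} (h : d ≤ e) : Cf d ≤ Cf e := by
  induction e with
  | zero => simp_all
  | succ e ih =>
    rcases Nat.lt_or_ge d (e + 1) with h' | h'
    · exact le_trans (ih (by omega)) (le_of_lt (Cf_lt_succ e))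
    · have : d = e + 1 := by omega
      simp [this]

-- the abstract version of A's while loop: the resulting digit length
def fA : Nat → Int → Nat → Nat
  | 0, _, d => d
  | fuel + 1, i, d => if i ≥ Cf d then fA fuel i (d + 1) else d

-- "e is the digit length of position i": the property both searches pin down
def PLen (i : Int) (e : Nat) : Prop := 1 ≤ e ∧ i < Cf e ∧ (e = 1 ∨ Cf (e - 1) ≤ i)

lemma PLen_uniq {i : Int} {e1 e2 : Nat} (h1 : PLen i e1) (h2 : PLen i e2) : e1 = e2 := by
  obtain ⟨a1, b1, c1⟩ := h1
  obtain ⟨a2, b2, c2⟩ := h2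
  by_contra hne
  rcases Nat.lt_or_ge e1 e2 with h | h
  · rcases c2 with rfl | c2
    · omega
    · have := Cf_mono (show e1 ≤ e2 - 1 by omega); omega
  · have h : e2 < e1 := by omega
    rcases c1 with rfl | c1
    · omega
    · have := Cf_mono (show e2 ≤ e1 - 1 by omega); omega

lemma fA_spec (fuel : Nat) (i : Int) (d : Nat) (hd : 1 ≤ d)
    (hf : i < Cf (d - 1 + fuel)) (hlow : d = 1 ∨ Cf (d - 1) ≤ i) :
    PLen i (fA fuel i d) := by
  induction fuel generalizing d with
  | zero =>
    simp only [Nat.add_zero] at hf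
    have hc := Cf_mono (show d - 1 ≤ d by omega)
    exact ⟨hd, by simp only [fA]; omega, by simp only [fA]; exact hlow⟩
  | succ fuel ih =>
    simp only [fA]
    by_cases h : i ≥ Cf d
    · rw [if_pos h]
      have harg : d - 1 + (fuel + 1) = d + 1 - 1 + fuel := by omega
      rw [harg] at hf
      exact ih (d + 1) (by omega) hf (Or.inr (by simpa using h))
    · rw [if_neg h]
      exact ⟨hd, by omega, hlow⟩

lemma loopA_inv (fuel : Nat) (i : Int) (d : Nat) (hd : 1 ≤ d) :
    champLoopA fuel i (Cf (d - 1)) (d : Int) (10 ^ (d - 1)) (9 * 10 ^ (d - 1)) (Cf d)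
      = (Cf (fA fuel i d - 1), ((fA fuel i d : Nat) : Int), 10 ^ (fA fuel i d - 1),
         9 * 10 ^ (fA fuel i d - 1), Cf (fA fuel i d)) := by
  induction fuel generalizing d with
  | zero => simp [champLoopA, fA]
  | succ fuel ih =>
    simp only [champLoopA, fA, ge_iff_le]
    by_cases h : Cf d ≤ i
    · rw [if_pos h, if_pos h]
      have h1 : (10 : Int) ^ (d - 1) * 10 = 10 ^ (d + 1 - 1) := by
        have hdd : d + 1 - 1 = (d - 1) + 1 := by omega
        rw [hdd, pow_succ]
      have h2 : (9 : Int) * 10 ^ (d - 1) * 10 = 9 * 10 ^ (d + 1 - 1) := by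
        rw [mul_assoc, h1]
      have h3 : Cf d + 9 * 10 ^ (d - 1) * 10 * ((d : Int) + 1) = Cf (d + 1) := by
        rw [h2]
        have hdd : d + 1 - 1 = d := by omega
        rw [hdd]
        simp [Cf]
      have h4 : Cf d = Cf (d + 1 - 1) := by norm_num
      have h5 : ((d : Int) + 1) = ((d + 1 : Nat) : Int) := by push_cast; ring
      rw [h3, h5, show (Cf d) = Cf (d + 1 - 1) from h4, h1, h2]
      exact ih (d + 1) (by omega)
    · rw [if_neg h, if_neg h]

-- champernowneA i in terms of the abstract digit length
lemma champA_eq (i : Int) :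
    champernowneA i =
      PySem.Int.mod
        (PySem.Int.floordiv
          (PySem.Int.floordiv (i - Cf (fA 32 i 1 - 1)) ((fA 32 i 1 : Nat) : Int)
            + 10 ^ (fA 32 i 1 - 1))
          (10 ^ (((fA 32 i 1 : Nat) : Int)
              - (PySem.Int.mod (i - Cf (fA 32 i 1 - 1)) ((fA 32 i 1 : Nat) : Int) + 1)).toNat))
        10 := by
  have hinit : champLoopA 32 i 0 1 1 9 9
      = champLoopA 32 i (Cf (1 - 1)) ((1 : Nat) : Int) (10 ^ (1 - 1)) (9 * 10 ^ (1 - 1)) (Cf 1) := by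
    norm_num [Cf]
  unfold champernowneA
  rw [hinit, loopA_inv 32 i 1 (by norm_num)]
  simp only [pyDigit]

-- the build loop's resulting table size
def gB : Nat → Int → Nat → Nat
  | 0, _, d => d
  | fuel + 1, m, d => if Cf (d - 1) ≤ m then gB fuel m (d + 1) else d

lemma range_map_getLast (d : Nat) (hd : 1 ≤ d) :
    (PySem.List.pyGet? ((List.range d).map Cf) (-1)).getD 0 = Cf (d - 1) := by
  obtain ⟨k, rfl⟩ : ∃ k, d = k + 1 := ⟨d - 1, by omega⟩
  rw [List.range_succ, List.map_append]
  simp [PySem.List.pyGet?_neg_one_append_singleton]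

lemma build_inv (fuel : Nat) (m : Int) (d : Nat) (hd : 1 ≤ d) :
    buildBoundsB fuel m ((List.range d).map Cf) (d : Int)
      = (List.range (gB fuel m d)).map Cf := by
  induction fuel generalizing d with
  | zero => simp [buildBoundsB, gB]
  | succ fuel ih =>
    simp only [buildBoundsB, gB, range_map_getLast d hd]
    by_cases h : Cf (d - 1) ≤ m
    · rw [if_pos h, if_pos h]
      have hstep : Cf (d - 1) + 9 * 10 ^ (((d : Int)) - 1).toNat * (d : Int) = Cf d := by
        obtain ⟨k, rfl⟩ : ∃ k, d = k + 1 := ⟨d - 1, by omega⟩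
        have ht : (((k : Nat) : Int) + 1 - 1).toNat = k := by omega
        push_cast
        rw [ht]
        simp [Cf]
      have happ : (List.range d).map Cf ++ [Cf d] = (List.range (d + 1)).map Cf := by
        rw [List.range_succ, List.map_append]; rfl
      have hcast : ((d : Int)) + 1 = ((d + 1 : Nat) : Int) := by push_cast; ring
      rw [hstep, happ, hcast]
      exact ih (d + 1) (by omega)
    · rw [if_neg h, if_neg h]

lemma gB_spec (fuel : Nat) (m : Int) (d : Nat) (hd : 1 ≤ d)
    (hf : m < Cf (d - 1 + fuel)) :
    d ≤ gB fuel m d ∧ gB fuel m d ≤ d + fuel ∧ m < Cf (gB fuel m d - 1) := by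
  induction fuel generalizing d with
  | zero =>
    simp only [Nat.add_zero] at hf
    simp only [gB]
    exact ⟨le_refl d, by omega, hf⟩
  | succ fuel ih =>
    simp only [gB]
    by_cases h : Cf (d - 1) ≤ m
    · rw [if_pos h]
      have harg : d - 1 + (fuel + 1) = d + 1 - 1 + fuel := by omega
      rw [harg] at hf
      have := ih (d + 1) (by omega) hf
      omega
    · rw [if_neg h]
      exact ⟨le_refl d, by omega, by simpa using h⟩

-- reading the table
lemma table_get (K : Nat) (j : Int) (h0 : 0 ≤ j) (hK : j < (K : Int)) :
    (PySem.List.pyGet? ((List.range K).map Cf) j).getD 0 = Cf j.toNat := by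
  rw [PySem.List.pyGet?_of_nonneg _ h0]
  have : j.toNat < K := by omega
  simp [this]

-- the binary search finds the digit length
lemma bs_spec (fuel : Nat) (K : Nat) (i lo hi : Int)
    (hlo : 1 ≤ lo) (hlohi : lo ≤ hi) (hhi : hi ≤ (K : Int) - 1)
    (hfuel : hi - lo ≤ (fuel : Int))
    (hlow : lo = 1 ∨ Cf (lo.toNat - 1) ≤ i) (hup : i < Cf hi.toNat) :
    1 ≤ bsearchB fuel ((List.range K).map Cf) i lo hi
      ∧ bsearchB fuel ((List.range K).map Cf) i lo hi ≤ (K : Int) - 1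
      ∧ PLen i (bsearchB fuel ((List.range K).map Cf) i lo hi).toNat := by
  induction fuel generalizing lo hi with
  | zero =>
    have hle : lo = hi := by omega
    subst hle
    simp only [bsearchB]
    refine ⟨hlo, by omega, by omega, hup, ?_⟩
    rcases hlow with h | h
    · left; omega
    · right; exact h
  | succ fuel ih =>
    simp only [bsearchB]
    by_cases h : lo < hi
    · rw [if_pos h]
      have h2 : PySem.Int.floordiv (lo + hi + 1) 2 = (lo + hi + 1) / 2 :=
        PySem.Int.floordiv_eq_ediv_of_pos (by norm_num)
      simp only [h2]
      have hmid1 : lo + 1 ≤ (lo + hi + 1) / 2 := by omega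
      have hmid2 : (lo + hi + 1) / 2 ≤ hi := by omega
      have hget : (PySem.List.pyGet? ((List.range K).map Cf) ((lo + hi + 1) / 2 - 1)).getD 0
          = Cf ((lo + hi + 1) / 2 - 1).toNat :=
        table_get K ((lo + hi + 1) / 2 - 1) (by omega) (by omega)
      rw [hget]
      by_cases hc : Cf ((lo + hi + 1) / 2 - 1).toNat ≤ i
      · rw [if_pos hc]
        have hc' : Cf (((lo + hi + 1) / 2).toNat - 1) ≤ i := by
          have : ((lo + hi + 1) / 2 - 1).toNat = ((lo + hi + 1) / 2).toNat - 1 := by omega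
          rwa [this] at hc
        exact ih ((lo + hi + 1) / 2) hi (by omega) hmid2 hhi (by omega) (Or.inr hc') hup
      · rw [if_neg hc]
        refine ih lo ((lo + hi + 1) / 2 - 1) hlo (by omega) (by omega) (by omega) hlow ?_
        omega
    · rw [if_neg h]
      have hle : lo = hi := by omega
      subst hle
      refine ⟨hlo, by omega, by omega, hup, ?_⟩
      rcases hlow with h' | h'
      · left; omega
      · right; exact h'

-- the per-index factor of B, over the built table, equals champernowneA
lemma factor_eq (i m : Int) (K : Nat) (hK : 1 ≤ K)
    (him : i ≤ m) (hi : i < Cf 11) (hm : m < Cf (K - 1)) (hKb : K ≤ 65) :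
    champernowneA i =
      (let bounds := (List.range K).map Cf
       let d := bsearchB 64 bounds i 1 ((bounds.length : Int) - 1)
       let b := (PySem.List.pyGet? bounds (d - 1)).getD 0
       let q := PySem.Int.floordiv (i - b) d
       let r := PySem.Int.mod (i - b) d
       PySem.Int.mod
         (PySem.Int.floordiv (10 ^ (d - 1).toNat + q) (10 ^ (d - 1 - r).toNat)) 10) := by
  have hlen : ((((List.range K).map Cf).length : Nat) : Int) = (K : Int) := by simp
  simp only [hlen]
  -- the binary-search result satisfies PLen
  have hB : 1 ≤ bsearchB 64 ((List.range K).map Cf) i 1 ((K : Int) - 1)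
      ∧ bsearchB 64 ((List.range K).map Cf) i 1 ((K : Int) - 1) ≤ max ((K : Int) - 1) 1
      ∧ PLen i (bsearchB 64 ((List.range K).map Cf) i 1 ((K : Int) - 1)).toNat := by
    rcases Nat.lt_or_ge K 2 with h2 | h2
    · have hK1 : K = 1 := by omega
      subst hK1
      simp only [Nat.cast_one]
      have hres : bsearchB 64 ((List.range 1).map Cf) i 1 ((1 : Int) - 1) = 1 := rfl
      rw [hres]
      have him0 : i < Cf 1 := by
        have hm0 : m < Cf 0 := by simpa using hm
        have h01 : Cf 0 < Cf 1 := Cf_lt_succ 0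
        omega
      exact ⟨le_refl 1, by norm_num, by norm_num, him0, Or.inl rfl⟩
    · have hup : i < Cf ((K : Int) - 1).toNat := by
        have ht : ((K : Int) - 1).toNat = K - 1 := by omega
        rw [ht]; omega
      have := bs_spec 64 K i 1 ((K : Int) - 1) (le_refl 1) (by omega) (by omega)
        (by omega) (Or.inl rfl) hup
      exact ⟨this.1, by omega, this.2.2⟩
  obtain ⟨hd1, hdK, hPB⟩ := hB
  set dB := bsearchB 64 ((List.range K).map Cf) i 1 ((K : Int) - 1) with hdB
  -- A's loop result satisfies PLen too, hence the two digit lengths agree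
  have hA : PLen i (fA 32 i 1) :=
    fA_spec 32 i 1 (le_refl 1)
      (by
        have h11 : Cf 11 ≤ Cf (1 - 1 + 32) := Cf_mono (by norm_num)
        omega)
      (Or.inl rfl)
  have heq : fA 32 i 1 = dB.toNat := PLen_uniq hA hPB
  have hb : (PySem.List.pyGet? ((List.range K).map Cf) (dB - 1)).getD 0 = Cf (dB - 1).toNat :=
    table_get K (dB - 1) (by omega) (by omega)
  rw [champA_eq, heq]
  simp only [hb]
  have ht1 : (dB - 1).toNat = dB.toNat - 1 := by omega
  have ht2 : ((dB.toNat : Nat) : Int) = dB := by omega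
  rw [ht1, ht2]
  have hexp : dB - (PySem.Int.mod (i - Cf (dB.toNat - 1)) dB + 1)
      = dB - 1 - PySem.Int.mod (i - Cf (dB.toNat - 1)) dB := by ring
  rw [hexp, add_comm (PySem.Int.floordiv (i - Cf (dB.toNat - 1)) dB) (10 ^ (dB.toNat - 1))]

lemma main_eq (indices : List Int) (hdom : Dom_problem40 indices) :
    problem40 indices = problem40_alt indices := by
  unfold problem40 problem40_alt productA
  rcases eq_or_ne indices [] with rfl | hne
  · simp
  rw [if_neg hne]
  obtain ⟨m, hm⟩ : ∃ m, PySem.List.max? indices (fun x => x) = some m := by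
    rcases h : PySem.List.max? indices (fun x => x) with _ | m
    · exact absurd ((PySem.List.max?_eq_none_iff indices _).mp h) hne
    · exact ⟨m, rfl⟩
  have hmax : ∀ y ∈ indices, y ≤ m := fun y hy => PySem.List.max?_isMax hm y hy
  have hmmem : m ∈ indices := PySem.List.max?_mem hm
  have hmdom : m ≤ 2147483648 := by
    have := List.all_eq_true.mp hdom m hmmem
    simp only [pvDomInt, decide_eq_true_eq] at this
    omega
  have hCf11 : (2147483648 : Int) < Cf 11 := by norm_num [Cf]
  have hbuild : buildBoundsB 64 m [0] 1 = (List.range (gB 64 m 1)).map Cf := by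
    have h0 : ([0] : List Int) = (List.range 1).map Cf := by simp [Cf]
    have h1 : ((1 : Nat) : Int) = 1 := by norm_num
    rw [h0, ← h1]
    exact build_inv 64 m 1 (le_refl 1)
  have hgB := gB_spec 64 m 1 (le_refl 1)
    (by
      have h64 : Cf 11 ≤ Cf (1 - 1 + 64) := Cf_mono (by norm_num)
      omega)
  obtain ⟨hK1, hK65, hmK⟩ := hgB
  rw [hm]
  simp only [Option.getD_some, hbuild, List.foldl_map]
  refine PySem.List.foldl_congr_mem indices _ _ 1 ?_
  intro acc x hx
  have hxm : x ≤ m := hmax x hx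
  have hxCf : x < Cf 11 := by omega
  rw [factor_eq x m (gB 64 m 1) hK1 hxm hxCf hmK (by omega)]

-- ===== VERDICT (by name: the statement is the Claim_ definition above) =====
theorem problem40_spec : Claim_equal_problem40 := by
  intro indices hdom
  unfold Spec_problem40
  exact main_eq indices hdom
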